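-- pv_equiv track=rewrite | github.com/TanZunsheng/PENCI | scripts/convert_hbn_to_hdf5.py | group_by_subject
-- ===== SOURCE A (Python) =====
-- from collections import defaultdict
-- from typing import Dict, List, Tuple
--
-- def group_by_subject(metadata: List[Dict]) -> Dict[str, List[Dict]]:
--     """按受试者 ID 分组 metadata 记录。"""
--     groups: Dict[str, List[Dict]] = defaultdict(list)
--     for meta in metadata:
--         path = meta["path"]
--         # 路径格式: .../preprocessing/sub-XXXXX/eeg/...
--         try:
--             subject_id = path.split("/preprocessing/")[1].split("/")[0]
--         except IndexError:
--             subject_id = "unknown"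
--         groups[subject_id].append(meta)
--     return dict(groups)
-- ===== SOURCE B (Python) =====
-- def group_by_subject(metadata):
--     """Group metadata records by subject ID extracted from meta["path"]."""
--     def subject_of(meta):
--         parts = meta["path"].split("/preprocessing/")
--         if len(parts) > 1:
--             return parts[1].split("/")[0]
--         return "unknown"
--     keys = [subject_of(m) for m in metadata]
--     return {k: [m for m, km in zip(metadata, keys) if km == k]
--             for k in dict.fromkeys(keys)}
-- ===== Notes on version B (the rewrite author's own statement) =====
-- stated objective: alternative
-- what changed: Replaces A's single-pass append-into-defaultdict scan with a two-phase plan: compute the list of subject keys once, dedup them in first-appearance order with dict.fromkeys, and build each group by filtering the zipped records; the try/except key extraction becomes an explicit length test.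
import Mathlib
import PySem

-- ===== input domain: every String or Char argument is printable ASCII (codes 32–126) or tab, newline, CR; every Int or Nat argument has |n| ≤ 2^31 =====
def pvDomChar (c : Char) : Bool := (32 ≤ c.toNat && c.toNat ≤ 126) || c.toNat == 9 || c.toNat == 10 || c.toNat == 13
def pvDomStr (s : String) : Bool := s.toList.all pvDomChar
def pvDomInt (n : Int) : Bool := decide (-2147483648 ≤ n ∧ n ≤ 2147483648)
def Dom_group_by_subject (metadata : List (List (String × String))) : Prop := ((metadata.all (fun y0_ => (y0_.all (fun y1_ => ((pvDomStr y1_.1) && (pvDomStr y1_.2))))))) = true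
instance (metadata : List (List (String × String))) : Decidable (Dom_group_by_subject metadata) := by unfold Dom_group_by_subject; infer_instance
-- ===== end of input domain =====

-- B groups records by computing the key list once, deduplicating it in first-appearance
-- order, and filtering per key, instead of A's append-into-defaultdict single pass.


-- ===== PORT A =====
-- m["path"] : first-match association-list lookup; Pre_ guarantees the key exists
-- (shared by both ports: both Pythons subscript the record the same way).
def pvPathOf (m_ : List (String × String)) : String :=
  ((m_.find? (fun p => p.1 == "path")).map Prod.snd).getD ""

-- path.split("/preprocessing/")[1].split("/")[0], with IndexError caught as "unknown".
def subjectIdA (path : String) : String :=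
  match PySem.Str.split? path "/preprocessing/" with
  | none => "unknown"          -- unreachable: the separator is nonempty
  | some parts =>
    match PySem.List.pyGet? parts 1 with
    | none => "unknown"        -- IndexError branch of A's try/except
    | some rest =>
      match PySem.Str.split? rest "/" with
      | none => "unknown"      -- unreachable: the separator is nonempty
      | some ps => (PySem.List.pyGet? ps 0).getD "unknown"   -- [0]; IndexError also caught

def group_by_subject (metadata : List (List (String × String))) : List (String × List (List (String × String))) :=
  (metadata.foldl
    (fun (g : PySem.Dict String (List (List (String × String)))) m_ =>
      g.modify (subjectIdA (pvPathOf m_)) [] (fun l => l ++ [m_]))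
    PySem.Dict.empty).items

-- ===== PORT B =====
-- B's subject_of: explicit length test instead of try/except.
def subjectIdB (path : String) : String :=
  match PySem.Str.split? path "/preprocessing/" with
  | none => "unknown"          -- unreachable: the separator is nonempty
  | some parts =>
    if 1 < parts.length then
      match PySem.Str.split? (parts.getD 1 "") "/" with
      | none => "unknown"      -- unreachable: the separator is nonempty
      | some ps => ps.headD "unknown"   -- [0]; split never returns [] here
    else "unknown"

def group_by_subject_alt (metadata : List (List (String × String))) : List (String × List (List (String × String))) :=
  let keys := metadata.map (fun m => subjectIdB (pvPathOf m))
  (PySem.List.dedup keys).map (fun k =>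
    (k, ((metadata.zip keys).filter (fun p => p.2 == k)).map Prod.fst))

-- ===== PRECONDITION & SPEC =====
-- A (and B) raise KeyError on a record without a "path" key; exactly those inputs are excluded.
def Pre_group_by_subject (metadata : List (List (String × String))) : Prop :=
  ∀ m_ ∈ metadata, ∃ p ∈ m_, p.1 = "path"
instance (metadata : List (List (String × String))) : Decidable (Pre_group_by_subject metadata) := by unfold Pre_group_by_subject; infer_instance

def pvWitness_group_by_subject : (List (List (String × String))) :=
  [[("path", "x/preprocessing/sub-01/eeg/f.set"), ("n", "1")],
   [("path", "x/preprocessing/sub-01/eeg/g.set")],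
   [("path", "oddball")]]

def Spec_group_by_subject (metadata : List (List (String × String))) (out : List (String × List (List (String × String)))) : Prop := out = group_by_subject_alt metadata
instance (metadata : List (List (String × String))) (out : List (String × List (List (String × String)))) : Decidable (Spec_group_by_subject metadata out) := by unfold Spec_group_by_subject; infer_instance

-- ===== CLAIM (what is proved, stated in full; the proofs are below) =====
def Claim_equal_group_by_subject : Prop := ∀ (metadata : List (List (String × String))), Dom_group_by_subject metadata → Pre_group_by_subject metadata → Spec_group_by_subject metadata (group_by_subject metadata)

-- ===== LEMMAS AND PROOFS =====

-- The two key extractors agree.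
theorem subjectId_eq (path : String) : subjectIdA path = subjectIdB path := by
  unfold subjectIdA subjectIdB
  cases h : PySem.Str.split? path "/preprocessing/" with
  | none => rfl
  | some parts =>
    cases parts with
    | nil => simp [PySem.List.pyGet?, PySem.List.pyIdx?]
    | cons a t =>
      cases t with
      | nil => simp [PySem.List.pyGet?, PySem.List.pyIdx?]
      | cons b t' =>
        simp only [PySem.List.pyGet?, PySem.List.pyIdx?]
        norm_num
        cases h2 : PySem.Str.split? b "/" with
        | none => rfl
        | some ps =>
          cases ps with
          | nil => simp
          | cons c cs => simp

-- zip-with-keys filter projects to a plain filter on the records.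
theorem zip_filter_map (f : α → String) (k : String) (xs : List α) :
    ((xs.zip (xs.map f)).filter (fun p => p.2 == k)).map Prod.fst
      = xs.filter (fun x => f x == k) := by
  induction xs with
  | nil => rfl
  | cons x t ih =>
    simp only [List.map_cons, List.zip_cons_cons, List.filter_cons]
    by_cases h : f x = k
    · simp [h, ih]
    · simp [h, ih]

-- dedup over an appended element.
theorem dedup_append_singleton [BEq α] [LawfulBEq α] (l : List α) (a : α) :
    PySem.List.dedup (l ++ [a])
      = if a ∈ l then PySem.List.dedup l else PySem.List.dedup l ++ [a] := by
  simp only [PySem.List.dedup, PySem.Set.ofList, List.foldl_append, List.foldl_cons,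
    List.foldl_nil, PySem.Set.add, PySem.Set.contains]
  have hmem : a ∈ List.foldl PySem.Set.add PySem.Set.empty l ↔ a ∈ l := by
    simpa [PySem.Set.ofList] using PySem.Set.mem_ofList l a
  by_cases h : a ∈ l
  · rw [if_pos h, if_pos (by simpa [PySem.Set.contains, List.contains_iff_mem] using hmem.mpr h)]
  · rw [if_neg h, if_neg (by simpa [PySem.Set.contains, List.contains_iff_mem] using fun hm => h (hmem.mp hm))]

-- first-match lookup in a keyed map list.
theorem find?_map_key (ks : List String) (g : String → β) (k : String) :
    List.find? (fun p => p.1 == k) (ks.map (fun k' => (k', g k')))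
      = (ks.find? (fun k' => k' == k)).map (fun k' => (k', g k')) := by
  induction ks with
  | nil => rfl
  | cons x t ih =>
    by_cases h : x = k
    · simp [h]
    · simp only [List.map_cons, List.find?]
      simp only [show ((x, g x).1 == k) = false by simpa using h]
      exact ih

theorem find?_beq_of_mem (ks : List String) (k : String) (h : k ∈ ks) :
    ks.find? (fun k' => k' == k) = some k := by
  induction ks with
  | nil => cases h
  | cons x t ih =>
    by_cases hx : x = k
    · simp [hx]
    · simp only [List.find?, show (x == k) = false by simpa using hx]
      rcases List.mem_cons.mp h with h1 | h1
      · exact absurd h1.symm hx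
      · exact ih h1

-- Main invariant: the defaultdict fold's items are exactly B's dedup-and-filter table.
theorem fold_items {α : Type} (f : α → String) (xs : List α) :
    (xs.foldl (fun (g : PySem.Dict String (List α)) x =>
        g.modify (f x) [] (fun l => l ++ [x])) PySem.Dict.empty).items
      = (PySem.List.dedup (xs.map f)).map (fun k => (k, xs.filter (fun x => f x == k))) := by
  induction xs using List.reverseRecOn with
  | nil => rfl
  | append_singleton xs x ih =>
    rw [List.foldl_append, List.foldl_cons, List.foldl_nil]
    set d := xs.foldl (fun (g : PySem.Dict String (List α)) x =>
        g.modify (f x) [] (fun l => l ++ [x])) PySem.Dict.empty with hd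
    have hitems : d.items = (PySem.List.dedup (xs.map f)).map
        (fun k => (k, xs.filter (fun x => f x == k))) := ih
    have hmemdedup : ∀ k, k ∈ PySem.List.dedup (xs.map f) ↔ k ∈ xs.map f := fun k =>
      PySem.Set.mem_ofList (xs.map f) k
    rw [show PySem.Dict.modify d (f x) [] (fun l => l ++ [x])
          = d.insert (f x) (d.getD (f x) [] ++ [x]) from rfl]
    rw [PySem.Dict.items_insert]
    have hcontains : d.contains (f x) = decide (f x ∈ xs.map f) := by
      simp only [PySem.Dict.contains, hitems, List.any_map]
      by_cases h : f x ∈ xs.map f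
      · simp only [h, decide_true, List.any_eq_true]
        exact ⟨f x, (hmemdedup _).mpr h, by simp⟩
      · simp only [h, decide_false]
        rw [List.any_eq_false]
        intro k hk
        simp only [Function.comp_apply, beq_iff_eq]
        intro hkx
        exact h (hkx ▸ (hmemdedup _).mp hk)
    have hmap : (xs ++ [x]).map f = xs.map f ++ [f x] := by simp
    by_cases hmem : f x ∈ xs.map f
    · -- key already present
      rw [if_pos (by rw [hcontains]; simpa using hmem)]
      have hgetD : d.getD (f x) [] = xs.filter (fun x' => f x' == f x) := by
        simp only [PySem.Dict.getD, PySem.Dict.get?, hitems, find?_map_key,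
          find?_beq_of_mem _ _ ((hmemdedup _).mpr hmem)]
        rfl
      rw [hgetD, hitems, hmap, dedup_append_singleton, if_pos hmem, List.map_map]
      apply List.map_congr_left
      intro k hk
      by_cases hkx : k = f x
      · subst hkx
        simp [List.filter_append]
      · simp only [Function.comp]
        simp only [show ((k, List.filter (fun x => f x == k) xs).1 == f x) = false by
          simpa using hkx]
        simp [List.filter_append, show (f x == k) = false by simpa using fun h => hkx h.symm]
    · -- new key appended
      rw [if_neg (by rw [hcontains]; simpa using hmem)]
      have hgetD : d.getD (f x) [] = [] := by
        simp only [PySem.Dict.getD, PySem.Dict.get?, hitems, find?_map_key]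
        rw [List.find?_eq_none.mpr]
        · rfl
        · intro k hk
          simp only [beq_iff_eq]
          intro hkx
          exact hmem (hkx ▸ (hmemdedup _).mp hk)
      have hfilt_nil : xs.filter (fun x' => f x' == f x) = [] := by
        rw [List.filter_eq_nil_iff]
        intro a ha
        simp only [beq_iff_eq]
        exact fun h => hmem (h ▸ List.mem_map_of_mem ha)
      rw [hgetD, hitems, hmap, dedup_append_singleton, if_neg hmem, List.map_append]
      congr 1
      · apply List.map_congr_left
        intro k hk
        have hkx : ¬ (f x = k) := fun h => hmem (h ▸ (hmemdedup _).mp hk)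
        simp [List.filter_append, show (f x == k) = false by simpa using hkx]
      · simp [List.filter_append, hfilt_nil]

-- ===== VERDICT (by name: the statement is the Claim_ definition above) =====
theorem group_by_subject_spec : Claim_equal_group_by_subject := by
  intro metadata _ _
  unfold Spec_group_by_subject group_by_subject group_by_subject_alt
  simp only [zip_filter_map, subjectId_eq]
  exact fold_items (fun m => subjectIdB (pvPathOf m)) metadata
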